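-- pv_equiv track=rewrite | github.com/Sukiciwir/suki-dekrip | ascii.py | ascii_encode
-- ===== SOURCE A (Python) =====
-- def ascii_encode(text):
--     encoded = {"Binary": [], "Decimal": [], "Octal": [], "Hex": []}
--     for c in text:
--         encoded["Binary"].append(bin(ord(c))[2:].zfill(8))
--         encoded["Decimal"].append(str(ord(c)))
--         encoded["Octal"].append(oct(ord(c))[2:])
--         encoded["Hex"].append(hex(ord(c))[2:])
--
--     for key in encoded:
--         encoded[key] = " ".join(encoded[key])
--
--     return encoded
-- ===== SOURCE B (Python) =====
-- def _regroup(bits, k):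
--     # regroup a binary digit string into base-2**k digits, k bits per digit
--     pad = (-len(bits)) % k
--     bits = "0" * pad + bits
--     digits = "".join("0123456789abcdef"[int(bits[i:i + k], 2)] for i in range(0, len(bits), k))
--     return digits.lstrip("0") or "0"
--
-- def ascii_encode(text):
--     bins = ["".join("1" if (ord(c) >> (7 - i)) & 1 else "0" for i in range(8)) for c in text]
--     return {
--         "Binary": " ".join(bins),
--         "Decimal": " ".join(str(ord(c)) for c in text),
--         "Octal": " ".join(_regroup(b, 3) for b in bins),
--         "Hex": " ".join(_regroup(b, 4) for b in bins),
--     }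
-- ===== Notes on version B (the rewrite author's own statement) =====
-- stated objective: alternative
-- what changed: B computes only the 8-bit binary form per character by bit extraction and derives the octal and hex strings from it by regrouping the bit string in 3- and 4-bit chunks (with leading-zero stripping), instead of A's single loop calling bin/oct/hex separately and joining four parallel lists.
import Mathlib
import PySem

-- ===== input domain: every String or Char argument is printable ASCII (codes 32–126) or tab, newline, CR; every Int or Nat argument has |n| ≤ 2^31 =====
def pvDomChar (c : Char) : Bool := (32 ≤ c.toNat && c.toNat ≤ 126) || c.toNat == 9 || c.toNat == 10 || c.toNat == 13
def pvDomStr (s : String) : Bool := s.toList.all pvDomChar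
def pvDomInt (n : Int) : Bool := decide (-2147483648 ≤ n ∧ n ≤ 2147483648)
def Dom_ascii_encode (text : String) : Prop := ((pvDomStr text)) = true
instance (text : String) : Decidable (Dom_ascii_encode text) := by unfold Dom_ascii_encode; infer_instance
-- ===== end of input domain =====

-- B computes only the 8-bit binary form per character by bit extraction and derives octal/hex
-- from it by regrouping the bit string in 3-/4-bit chunks; alternative algorithm, same O(n) cost.

-- ===== PORT A =====
-- digit character for a value 0..35, as Python's bin/oct/hex produce (lowercase); exact
def pvDigitChar (d : Nat) : Char := if d < 10 then Char.ofNat (48 + d) else Char.ofNat (87 + d)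

-- hand port of bin(n)[2:] / oct(n)[2:] / hex(n)[2:] for n ≥ 0 (PySem has no oct/hex primitive);
-- exact for nonnegative n and base ≥ 2: most-significant-first digit string.
-- fuel = n+1 at the call site is always sufficient since n/base < n when base ≥ 2 ≤ n.
def pvDigitsAF : Nat → Nat → Nat → List Char
  | 0, _, n => [pvDigitChar n]
  | fuel + 1, base, n =>
    if n < base ∨ base < 2 then [pvDigitChar n]
    else pvDigitsAF fuel base (n / base) ++ [pvDigitChar (n % base)]

def pvDigitsA (base n : Nat) : List Char := pvDigitsAF (n + 1) base n

def ascii_encode (text : String) : List (String × String) :=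
  -- the first loop: append to the four lists of the dict
  let enc := text.toList.foldl
    (fun (acc : List String × List String × List String × List String) c =>
      (acc.1 ++ [String.ofList (PySem.Chars.zfill (pvDigitsA 2 c.toNat) 8)],
       acc.2.1 ++ [PySem.Int.toStr (c.toNat : Int)],
       acc.2.2.1 ++ [String.ofList (pvDigitsA 8 c.toNat)],
       acc.2.2.2 ++ [String.ofList (pvDigitsA 16 c.toNat)]))
    ([], [], [], [])
  -- the second loop: join each value with " "
  [("Binary", PySem.Str.join " " enc.1),
   ("Decimal", PySem.Str.join " " enc.2.1),
   ("Octal", PySem.Str.join " " enc.2.2.1),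
   ("Hex", PySem.Str.join " " enc.2.2.2)]

-- ===== PORT B =====
-- '"1" if (n >> (7-i)) & 1 else "0" for i in range(8)' — exact bit extraction
def pvBits8 (n : Nat) : List Char :=
  (List.range 8).map (fun i => if (n >>> (7 - i)) &&& 1 == 1 then '1' else '0')

def pvHexAlphabet : List Char := "0123456789abcdef".toList

-- hand port of '"0123456789abcdef"[int(bits, 2)]' for a chunk of '0'/'1' chars; exact
def pvDigitOf (bits : List Char) : Char :=
  pvHexAlphabet.getD (bits.foldl (fun a c => 2 * a + (if c == '1' then 1 else 0)) 0) '0'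

-- the 'for i in range(0, len(bits), k)' stride loop: one digit per k-bit chunk.
-- fuel = l.length+1 always suffices: each step with k ≥ 1 drops at least one element.
def pvChunkF : Nat → Nat → List Char → List Char
  | 0, _, _ => []
  | fuel + 1, k, l =>
    if l.isEmpty || k == 0 then []
    else pvDigitOf (l.take k) :: pvChunkF fuel k (l.drop k)

-- hand port of _regroup(bits, k); '(-len) % k' via PySem.Int.mod (Python sign rule), exact
def pvRegroup (b : List Char) (k : Nat) : List Char :=
  let pad := (PySem.Int.mod (-(b.length : Int)) (k : Int)).toNat
  let padded := List.replicate pad '0' ++ b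
  let digits := pvChunkF (padded.length + 1) k padded
  let stripped := digits.dropWhile (· == '0')   -- lstrip("0")
  if stripped = [] then ['0'] else stripped      -- 'or "0"'

def ascii_encode_alt (text : String) : List (String × String) :=
  let bins := text.toList.map (fun c => pvBits8 c.toNat)
  [("Binary", PySem.Str.join " " (bins.map String.ofList)),
   ("Decimal", PySem.Str.join " " (text.toList.map (fun c => PySem.Int.toStr (c.toNat : Int)))),
   ("Octal", PySem.Str.join " " (bins.map (fun b => String.ofList (pvRegroup b 3)))),
   ("Hex", PySem.Str.join " " (bins.map (fun b => String.ofList (pvRegroup b 4))))]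

-- ===== PRECONDITION & SPEC =====
def Spec_ascii_encode (text : String) (out : List (String × String)) : Prop := out = ascii_encode_alt text
instance (text : String) (out : List (String × String)) : Decidable (Spec_ascii_encode text out) := by unfold Spec_ascii_encode; infer_instance

-- ===== CLAIM =====
def Claim_equal_ascii_encode : Prop := ∀ (text : String), Dom_ascii_encode text → Spec_ascii_encode text (ascii_encode text)

-- ===== LEMMAS AND PROOFS =====
lemma fold4_eq (xs : List Char)
    (f1 f2 f3 f4 : Char → String)
    (a b c d : List String) :
    xs.foldl (fun (acc : List String × List String × List String × List String) ch =>
        (acc.1 ++ [f1 ch], acc.2.1 ++ [f2 ch], acc.2.2.1 ++ [f3 ch], acc.2.2.2 ++ [f4 ch]))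
      (a, b, c, d)
      = (a ++ xs.map f1, b ++ xs.map f2, c ++ xs.map f3, d ++ xs.map f4) := by
  induction xs generalizing a b c d with
  | nil => simp
  | cons x xs ih => simp [List.foldl_cons, ih, List.append_assoc]

set_option maxRecDepth 4000 in
lemma perChar_bin : ∀ n < 127, PySem.Chars.zfill (pvDigitsA 2 n) 8 = pvBits8 n := by decide
set_option maxRecDepth 4000 in
lemma perChar_oct : ∀ n < 127, pvDigitsA 8 n = pvRegroup (pvBits8 n) 3 := by decide
set_option maxRecDepth 4000 in
lemma perChar_hex : ∀ n < 127, pvDigitsA 16 n = pvRegroup (pvBits8 n) 4 := by decide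

lemma dom_char_lt {c : Char} (h : pvDomChar c = true) : c.toNat < 127 := by
  simp [pvDomChar] at h; omega

-- ===== VERDICT =====
theorem ascii_encode_spec : Claim_equal_ascii_encode := by
  intro text hdom
  have hmem : ∀ c ∈ text.toList, c.toNat < 127 := by
    intro c hc
    have := hdom
    simp only [Dom_ascii_encode, pvDomStr, List.all_eq_true] at this
    exact dom_char_lt (this c hc)
  have h1 : text.toList.map (fun ch => String.ofList (PySem.Chars.zfill (pvDigitsA 2 ch.toNat) 8))
      = text.toList.map (String.ofList ∘ fun c => pvBits8 c.toNat) :=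
    List.map_congr_left (fun c hc => by simp [perChar_bin _ (hmem c hc)])
  have h2 : text.toList.map (fun ch => String.ofList (pvDigitsA 8 ch.toNat))
      = text.toList.map ((fun b => String.ofList (pvRegroup b 3)) ∘ fun c => pvBits8 c.toNat) :=
    List.map_congr_left (fun c hc => by simp [perChar_oct _ (hmem c hc)])
  have h3 : text.toList.map (fun ch => String.ofList (pvDigitsA 16 ch.toNat))
      = text.toList.map ((fun b => String.ofList (pvRegroup b 4)) ∘ fun c => pvBits8 c.toNat) :=
    List.map_congr_left (fun c hc => by simp [perChar_hex _ (hmem c hc)])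
  unfold Spec_ascii_encode ascii_encode ascii_encode_alt
  simp only [fold4_eq, List.nil_append, List.map_map, h1, h2, h3]
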